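-- pv_equiv track=rewrite | github.com/posl/comment_recommendation | script/split_gen/4_time/zh/252_D/7.py | solve
-- ===== SOURCE A (Python) =====
-- def solve(n, a):
--     from collections import Counter
--     a = Counter(a)
--     a = sorted(a.items(), key=lambda x: x[0])
--     ans = 0
--     for i in range(len(a)):
--         for j in range(i + 1, len(a)):
--             for k in range(j + 1, len(a)):
--                 if a[i][0] != a[j][0] and a[j][0] != a[k][0] and a[i][0] != a[k][0]:
--                     ans += a[i][1] * a[j][1] * a[k][1]
--     return ans
-- ===== SOURCE B (Python) =====
-- def solve(n, a):
--     from collections import Counter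
--     e1 = e2 = e3 = 0
--     for c in Counter(a).values():
--         e3 += e2 * c
--         e2 += e1 * c
--         e1 += c
--     return e3
-- ===== Notes on version B (the rewrite author's own statement) =====
-- stated objective: faster
-- what changed: A enumerates all index triples i<j<k of the sorted distinct-value/count items (cubic in the number of distinct values, with a key-inequality test that is always true); B makes one pass over the Counter's counts accumulating the elementary symmetric sums e1, e2, e3 and returns e3.
import Mathlib
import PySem

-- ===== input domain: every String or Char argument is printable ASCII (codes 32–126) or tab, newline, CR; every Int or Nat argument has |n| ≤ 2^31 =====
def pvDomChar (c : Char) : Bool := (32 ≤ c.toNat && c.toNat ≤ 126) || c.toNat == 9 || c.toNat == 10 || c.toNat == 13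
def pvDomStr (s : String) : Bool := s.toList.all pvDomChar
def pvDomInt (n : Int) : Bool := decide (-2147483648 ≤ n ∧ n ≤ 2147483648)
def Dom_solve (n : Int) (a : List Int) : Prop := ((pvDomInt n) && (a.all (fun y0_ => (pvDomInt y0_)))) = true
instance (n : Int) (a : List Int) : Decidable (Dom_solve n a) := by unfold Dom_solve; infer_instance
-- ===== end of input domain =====

-- B replaces A's cubic triple loop over the distinct values by a single pass that
-- accumulates the elementary symmetric sums e1, e2, e3 of the counts (O(m^3) → O(m)).

-- ===== PORT A =====
-- the three nested index loops of A over the sorted (value, count) items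
def pvTriple (l : List (Int × Int)) : Int :=
  (PySem.List.pyRange 0 (PySem.List.len l)).foldl (fun ans i =>
    (PySem.List.pyRange (i + 1) (PySem.List.len l)).foldl (fun ans j =>
      (PySem.List.pyRange (j + 1) (PySem.List.len l)).foldl (fun ans k =>
        if (PySem.List.pyGetD l i (0, 0)).1 ≠ (PySem.List.pyGetD l j (0, 0)).1 ∧
           (PySem.List.pyGetD l j (0, 0)).1 ≠ (PySem.List.pyGetD l k (0, 0)).1 ∧
           (PySem.List.pyGetD l i (0, 0)).1 ≠ (PySem.List.pyGetD l k (0, 0)).1 then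
          ans + (PySem.List.pyGetD l i (0, 0)).2 * (PySem.List.pyGetD l j (0, 0)).2 *
                (PySem.List.pyGetD l k (0, 0)).2
        else ans) ans) ans) 0

def solve (n : Int) (a : List Int) : Int :=
  pvTriple (PySem.List.sorted (PySem.Dict.counter a).items (fun x => x.1) false)

-- ===== PORT B =====
-- one loop iteration of Source B: (e1, e2, e3) updated with the next count c
def pvStep (s : Int × Int × Int) (c : Int) : Int × Int × Int :=
  (s.1 + c, s.2.1 + s.1 * c, s.2.2 + s.2.1 * c)

def solve_alt (n : Int) (a : List Int) : Int :=
  ((PySem.Dict.counter a).values.foldl pvStep (0, 0, 0)).2.2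

-- ===== PRECONDITION & SPEC =====
def Spec_solve (n : Int) (a : List Int) (out : Int) : Prop := out = solve_alt n a
instance (n : Int) (a : List Int) (out : Int) : Decidable (Spec_solve n a out) := by unfold Spec_solve; infer_instance

-- ===== CLAIM (what is proved, stated in full; the proofs are below) =====
def Claim_equal_solve : Prop := ∀ (n : Int) (a : List Int), Dom_solve n a → Spec_solve n a (solve n a)

-- ===== LEMMAS AND PROOFS =====

-- elementary symmetric sums, structurally
def pvS1 : List Int → Int
  | [] => 0
  | c :: t => c + pvS1 t
def pvS2 : List Int → Int
  | [] => 0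
  | c :: t => c * pvS1 t + pvS2 t
def pvS3 : List Int → Int
  | [] => 0
  | c :: t => c * pvS2 t + pvS3 t

-- structural forms of A's three loops (suffix recursion)
def pvSumK (p q : Int × Int) : List (Int × Int) → Int
  | [] => 0
  | r :: t => (if p.1 ≠ q.1 ∧ q.1 ≠ r.1 ∧ p.1 ≠ r.1 then p.2 * q.2 * r.2 else 0) + pvSumK p q t
def pvSumJ (p : Int × Int) : List (Int × Int) → Int
  | [] => 0
  | q :: t => pvSumK p q t + pvSumJ p t
def pvSumI : List (Int × Int) → Int
  | [] => 0
  | p :: t => pvSumJ p t + pvSumI t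

theorem pvFold_char (cs : List Int) : ∀ (x y z : Int),
    cs.foldl pvStep (x, y, z) =
      (x + pvS1 cs, y + x * pvS1 cs + pvS2 cs,
       z + y * pvS1 cs + x * pvS2 cs + pvS3 cs) := by
  induction cs with
  | nil => intro x y z; simp [pvS1, pvS2, pvS3]
  | cons c t ih =>
      intro x y z
      simp only [List.foldl_cons, pvStep, pvS1, pvS2, pvS3, ih]
      refine Prod.ext (by ring) (Prod.ext (by ring) (by ring))

theorem pvStep_comm (s : Int × Int × Int) (x y : Int) :
    pvStep (pvStep s x) y = pvStep (pvStep s y) x := by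
  refine Prod.ext (by simp [pvStep]; ring) (Prod.ext (by simp [pvStep]; ring) (by simp [pvStep]; ring))

theorem pvFold_perm {l1 l2 : List Int} (h : l1.Perm l2) :
    ∀ init, l1.foldl pvStep init = l2.foldl pvStep init := by
  induction h with
  | nil => intro init; rfl
  | cons x _ ih => intro init; simp only [List.foldl_cons]; exact ih _
  | swap x y l => intro init; simp only [List.foldl_cons]; rw [pvStep_comm]
  | trans _ _ ih1 ih2 => intro init; rw [ih1, ih2]

-- innermost loop over a plain suffix list
theorem pvFoldK (p q : Int × Int) (t : List (Int × Int)) : ∀ (ans : Int),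
    t.foldl (fun ans r =>
        if p.1 ≠ q.1 ∧ q.1 ≠ r.1 ∧ p.1 ≠ r.1 then ans + p.2 * q.2 * r.2 else ans) ans
      = ans + pvSumK p q t := by
  induction t with
  | nil => intro ans; simp [pvSumK]
  | cons r t ih =>
      intro ans
      simp only [List.foldl_cons, pvSumK]
      split_ifs with h
      · rw [ih]; ring
      · rw [ih]; ring

theorem pvFoldJ (l : List (Int × Int)) (p : Int × Int) :
    ∀ (t : List (Int × Int)) (m : Int), 0 ≤ m → l.drop m.toNat = t → ∀ (ans : Int),
    (PySem.List.pyRange m (PySem.List.len l)).foldl (fun ans j =>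
      (PySem.List.pyRange (j + 1) (PySem.List.len l)).foldl (fun ans k =>
        if p.1 ≠ (PySem.List.pyGetD l j (0, 0)).1 ∧
           (PySem.List.pyGetD l j (0, 0)).1 ≠ (PySem.List.pyGetD l k (0, 0)).1 ∧
           p.1 ≠ (PySem.List.pyGetD l k (0, 0)).1 then
          ans + p.2 * (PySem.List.pyGetD l j (0, 0)).2 * (PySem.List.pyGetD l k (0, 0)).2
        else ans) ans) ans
      = ans + pvSumJ p t := by
  intro t
  induction t with
  | nil =>
      intro m hm hdrop ans
      have hlen : l.length ≤ m.toNat := List.drop_eq_nil_iff.mp hdrop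
      rw [PySem.List.pyRange_one_eq_nil (by simp only [PySem.List.len]; omega)]
      simp [pvSumJ]
  | cons q t ih =>
      intro m hm hdrop ans
      have hlt : m.toNat < l.length := by
        by_contra hc
        rw [List.drop_eq_nil_of_le (by omega)] at hdrop
        simp at hdrop
      have hcons := List.drop_eq_getElem_cons (l := l) hlt
      rw [hdrop] at hcons
      injection hcons with hq ht
      have hget : PySem.List.pyGetD l m (0, 0) = q := by
        rw [PySem.List.pyGetD_eq_getElem l (0, 0) hm (by omega), ← hq]
      have hdrop' : l.drop (m + 1).toNat = t := by
        have h1 : (m + 1).toNat = m.toNat + 1 := by omega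
        rw [h1, ← ht]
      rw [PySem.List.pyRange_one_cons (by simp only [PySem.List.len]; omega)]
      simp only [List.foldl_cons]
      rw [PySem.List.foldl_pyRange_pyGetD l (0, 0)
        (fun ans r =>
          if p.1 ≠ (PySem.List.pyGetD l m (0, 0)).1 ∧ (PySem.List.pyGetD l m (0, 0)).1 ≠ r.1 ∧
             p.1 ≠ r.1 then
            ans + p.2 * (PySem.List.pyGetD l m (0, 0)).2 * r.2
          else ans) ans (by omega)]
      rw [hdrop', hget, pvFoldK]
      rw [ih (m + 1) (by omega) hdrop']
      simp only [pvSumJ]; ring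

theorem pvFoldI (l : List (Int × Int)) :
    ∀ (t : List (Int × Int)) (m : Int), 0 ≤ m → l.drop m.toNat = t → ∀ (ans : Int),
    (PySem.List.pyRange m (PySem.List.len l)).foldl (fun ans i =>
      (PySem.List.pyRange (i + 1) (PySem.List.len l)).foldl (fun ans j =>
        (PySem.List.pyRange (j + 1) (PySem.List.len l)).foldl (fun ans k =>
          if (PySem.List.pyGetD l i (0, 0)).1 ≠ (PySem.List.pyGetD l j (0, 0)).1 ∧
             (PySem.List.pyGetD l j (0, 0)).1 ≠ (PySem.List.pyGetD l k (0, 0)).1 ∧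
             (PySem.List.pyGetD l i (0, 0)).1 ≠ (PySem.List.pyGetD l k (0, 0)).1 then
            ans + (PySem.List.pyGetD l i (0, 0)).2 * (PySem.List.pyGetD l j (0, 0)).2 *
                  (PySem.List.pyGetD l k (0, 0)).2
          else ans) ans) ans) ans
      = ans + pvSumI t := by
  intro t
  induction t with
  | nil =>
      intro m hm hdrop ans
      have hlen : l.length ≤ m.toNat := List.drop_eq_nil_iff.mp hdrop
      rw [PySem.List.pyRange_one_eq_nil (by simp only [PySem.List.len]; omega)]
      simp [pvSumI]
  | cons p t ih =>
      intro m hm hdrop ans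
      have hlt : m.toNat < l.length := by
        by_contra hc
        rw [List.drop_eq_nil_of_le (by omega)] at hdrop
        simp at hdrop
      have hcons := List.drop_eq_getElem_cons (l := l) hlt
      rw [hdrop] at hcons
      injection hcons with hq ht
      have hget : PySem.List.pyGetD l m (0, 0) = p := by
        rw [PySem.List.pyGetD_eq_getElem l (0, 0) hm (by omega), ← hq]
      have hdrop' : l.drop (m + 1).toNat = t := by
        have h1 : (m + 1).toNat = m.toNat + 1 := by omega
        rw [h1, ← ht]
      rw [PySem.List.pyRange_one_cons (by simp only [PySem.List.len]; omega)]
      simp only [List.foldl_cons]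
      rw [hget]
      rw [pvFoldJ l p t (m + 1) (by omega) hdrop']
      rw [ih (m + 1) (by omega) hdrop']
      simp only [pvSumI]; ring

theorem pvSumK_eq (p q : Int × Int) (t : List (Int × Int)) (hpq : p.1 ≠ q.1)
    (hq : ∀ r ∈ t, q.1 ≠ r.1) (hp : ∀ r ∈ t, p.1 ≠ r.1) :
    pvSumK p q t = p.2 * q.2 * pvS1 (t.map (·.2)) := by
  induction t with
  | nil => simp [pvSumK, pvS1]
  | cons r t ih =>
      simp only [pvSumK, List.map_cons, pvS1]
      rw [if_pos ⟨hpq, hq r (by simp), hp r (by simp)⟩]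
      rw [ih (fun x hx => hq x (by simp [hx])) (fun x hx => hp x (by simp [hx]))]
      ring

theorem pvSumJ_eq (p : Int × Int) (t : List (Int × Int)) (hp : ∀ q ∈ t, p.1 ≠ q.1)
    (hpw : t.Pairwise (fun x y => x.1 ≠ y.1)) :
    pvSumJ p t = p.2 * pvS2 (t.map (·.2)) := by
  induction t with
  | nil => simp [pvSumJ, pvS2]
  | cons q t ih =>
      rw [List.pairwise_cons] at hpw
      simp only [pvSumJ, List.map_cons, pvS2]
      rw [pvSumK_eq p q t (hp q (by simp)) hpw.1 (fun x hx => hp x (by simp [hx]))]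
      rw [ih (fun x hx => hp x (by simp [hx])) hpw.2]
      ring

theorem pvSumI_eq (t : List (Int × Int)) (hpw : t.Pairwise (fun x y => x.1 ≠ y.1)) :
    pvSumI t = pvS3 (t.map (·.2)) := by
  induction t with
  | nil => simp [pvSumI, pvS3]
  | cons p t ih =>
      rw [List.pairwise_cons] at hpw
      simp only [pvSumI, List.map_cons, pvS3]
      rw [pvSumJ_eq p t hpw.1 hpw.2, ih hpw.2]

theorem pvS3_fold (cs : List Int) : pvS3 cs = (cs.foldl pvStep (0, 0, 0)).2.2 := by
  rw [pvFold_char]; simp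

-- ===== VERDICT (by name: the statement is the Claim_ definition above) =====
theorem solve_spec : Claim_equal_solve := by
  intro n a _
  unfold Spec_solve solve solve_alt pvTriple
  set l := PySem.List.sorted (PySem.Dict.counter a).items (fun x => x.1) false with hl
  have hperm : l.Perm (PySem.Dict.counter a).items := PySem.List.sorted_perm _ _ _
  have hnodupK : ((PySem.Dict.counter a).items.map (·.1)).Nodup := by
    have := PySem.Dict.nodup_keys_counter a
    simpa [PySem.Dict.keys] using this
  have hnodup : (l.map (·.1)).Nodup := ((hperm.map (·.1)).nodup_iff).mpr hnodupK
  have hpw : l.Pairwise (fun x y => x.1 ≠ y.1) := by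
    rw [List.Nodup, List.pairwise_map] at hnodup
    exact hnodup
  rw [pvFoldI l l 0 le_rfl (by simp)]
  rw [pvSumI_eq l hpw, pvS3_fold]
  have hvals : (l.map (·.2)).Perm (PySem.Dict.counter a).values := by
    simpa [PySem.Dict.values] using hperm.map (·.2)
  rw [pvFold_perm hvals]
  simp
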